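-- pv_equiv track=rewrite | github.com/YashGames2007/MyCodePrograms | Python/Practice Coding Proplems/day_6.py | like_or_dislike
-- ===== SOURCE A (Python) =====
-- def like_or_dislike(button_inputs: list[str]) -> str:
--
--     """
--     Function DocString
--     """
--
--     is_like = False
--     is_dislike = False
--
--     for _input in button_inputs:
--         if _input == "Like":
--             is_dislike = False
--             is_like = not is_like
--
--         elif _input == "Dislike":
--             is_like = False
--             is_dislike = not is_dislike
--
--     if not is_like and not is_dislike:
--         return "Nothing"
--
--     return "Like" if is_like else "Dislike"
-- ===== SOURCE B (Python) =====
-- def like_or_dislike(button_inputs: list[str]) -> str: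
--     # Backward scan: find the last Like/Dislike pressed and the parity of its
--     # trailing run (skipping other inputs, stopping at the opposite button).
--     last = None
--     run = 0
--     for x in reversed(button_inputs):
--         if x == "Like" or x == "Dislike":
--             if last is None:
--                 last = x
--                 run = 1
--             elif x == last:
--                 run += 1
--             else:
--                 break
--     if last is not None and run % 2 == 1:
--         return last
--     return "Nothing"
-- ===== Notes on version B (the rewrite author's own statement) =====
-- stated objective: alternative
-- what changed: Replaces the forward two-flag toggle state machine with a backward scan that finds the last Like/Dislike pressed and the parity of its trailing run (stopping early at the opposite button).
import Mathlib
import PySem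

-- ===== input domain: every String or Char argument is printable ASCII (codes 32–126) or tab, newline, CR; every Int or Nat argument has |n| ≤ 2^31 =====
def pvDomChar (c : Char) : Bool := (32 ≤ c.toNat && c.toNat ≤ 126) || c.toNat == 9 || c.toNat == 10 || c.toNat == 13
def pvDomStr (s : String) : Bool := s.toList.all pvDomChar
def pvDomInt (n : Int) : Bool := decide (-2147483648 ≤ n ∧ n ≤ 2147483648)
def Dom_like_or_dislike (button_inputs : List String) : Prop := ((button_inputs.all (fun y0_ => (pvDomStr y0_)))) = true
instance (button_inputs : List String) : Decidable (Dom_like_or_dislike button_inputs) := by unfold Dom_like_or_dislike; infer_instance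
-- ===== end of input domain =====

-- B replaces A's forward two-flag toggle state machine with a backward scan for the
-- last Like/Dislike button and the parity of its trailing run (objective: alternative).


-- ===== PORT A =====
def like_or_dislike (button_inputs : List String) : String :=
  let st := button_inputs.foldl
    (fun (s : Bool × Bool) _input =>
      if _input = "Like" then (!s.1, false)
      else if _input = "Dislike" then (false, !s.2)
      else s)
    (false, false)
  if !st.1 && !st.2 then "Nothing"
  else if st.1 then "Like" else "Dislike"

-- ===== PORT B =====
-- the for-loop over reversed(button_inputs), with `break` as a non-recursive return
def lodAltLoop : List String → Option String → Int → Option String × Int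
  | [], last, run => (last, run)
  | x :: xs, last, run =>
    if x = "Like" ∨ x = "Dislike" then
      match last with
      | none => lodAltLoop xs (some x) 1
      | some l => if x = l then lodAltLoop xs (some l) (run + 1) else (some l, run)
    else lodAltLoop xs last run

def like_or_dislike_alt (button_inputs : List String) : String :=
  let r := lodAltLoop button_inputs.reverse none 0
  match r.1 with
  | some l => if r.2 % 2 = 1 then l else "Nothing"
  | none => "Nothing"

-- ===== PRECONDITION & SPEC =====
def Spec_like_or_dislike (button_inputs : List String) (out : String) : Prop := out = like_or_dislike_alt button_inputs
instance (button_inputs : List String) (out : String) : Decidable (Spec_like_or_dislike button_inputs out) := by unfold Spec_like_or_dislike; infer_instance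

-- ===== CLAIM (what is proved, stated in full; the proofs are below) =====
def Claim_equal_like_or_dislike : Prop := ∀ (button_inputs : List String), Dom_like_or_dislike button_inputs → Spec_like_or_dislike button_inputs (like_or_dislike button_inputs)

-- ===== LEMMAS AND PROOFS =====

-- first Like/Dislike element of a list (proof-side only)
def lodFirstRel : List String → Option String
  | [] => none
  | x :: xs => if x = "Like" ∨ x = "Dislike" then some x else lodFirstRel xs

-- length of the leading run of l, skipping non-buttons, stopping at the other button
def lodTrail : List String → String → Int
  | [], _ => 0
  | x :: xs, l =>
    if x = l then 1 + lodTrail xs l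
    else if x = "Like" ∨ x = "Dislike" then 0
    else lodTrail xs l

lemma lodFirstRel_rel (xs : List String) (l : String) (h : lodFirstRel xs = some l) :
    l = "Like" ∨ l = "Dislike" := by
  induction xs with
  | nil => simp [lodFirstRel] at h
  | cons x xs ih =>
    simp only [lodFirstRel] at h
    split_ifs at h with hr
    · obtain rfl : x = l := by injection h
      exact hr
    · exact ih h

lemma lodTrail_of_firstRel_none (xs : List String) (l : String)
    (hl : l = "Like" ∨ l = "Dislike") (h : lodFirstRel xs = none) : lodTrail xs l = 0 := by
  induction xs with
  | nil => rfl
  | cons x xs ih =>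
    simp only [lodFirstRel] at h
    by_cases hr : x = "Like" ∨ x = "Dislike"
    · rw [if_pos hr] at h; exact absurd h (by simp)
    · rw [if_neg hr] at h
      have hx : x ≠ l := by rcases hl with rfl | rfl <;> tauto
      simp only [lodTrail, if_neg hx, if_neg hr]
      exact ih h

lemma lodTrail_of_firstRel_ne (xs : List String) (l m : String)
    (hl : l = "Like" ∨ l = "Dislike") (h : lodFirstRel xs = some m) (hne : m ≠ l) :
    lodTrail xs l = 0 := by
  induction xs with
  | nil => simp [lodFirstRel] at h
  | cons x xs ih =>
    simp only [lodFirstRel] at h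
    by_cases hr : x = "Like" ∨ x = "Dislike"
    · rw [if_pos hr] at h
      obtain rfl : x = m := by injection h
      simp only [lodTrail, if_neg hne, if_pos hr]
    · rw [if_neg hr] at h
      have hx : x ≠ l := by rcases hl with rfl | rfl <;> tauto
      simp only [lodTrail, if_neg hx, if_neg hr]
      exact ih h

lemma lodAltLoop_some (xs : List String) (l : String) (run : Int)
    (hl : l = "Like" ∨ l = "Dislike") :
    lodAltLoop xs (some l) run = (some l, run + lodTrail xs l) := by
  induction xs generalizing run with
  | nil => simp [lodAltLoop, lodTrail]
  | cons x xs ih =>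
    simp only [lodAltLoop, lodTrail]
    by_cases hx : x = l
    · subst hx
      rw [if_pos hl, if_pos rfl, if_pos rfl, ih]
      simp only [Prod.mk.injEq]
      exact ⟨trivial, by ring⟩
    · by_cases hr : x = "Like" ∨ x = "Dislike"
      · simp [hr, hx]
      · simp [hr, hx, ih]

lemma lodAltLoop_none (xs : List String) :
    lodAltLoop xs none 0 =
      match lodFirstRel xs with
      | none => (none, 0)
      | some l => (some l, lodTrail xs l) := by
  induction xs with
  | nil => rfl
  | cons x xs ih =>
    by_cases hr : x = "Like" ∨ x = "Dislike"
    · simp only [lodAltLoop, if_pos hr, lodFirstRel, lodTrail]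
      rw [lodAltLoop_some xs x 1 hr]
      simp
    · have hx1 : x ≠ "Like" := by tauto
      have hx2 : x ≠ "Dislike" := by tauto
      simp only [lodAltLoop, if_neg hr, lodFirstRel, ih]
      cases hfr : lodFirstRel xs with
      | none => rfl
      | some l =>
        have hxl : x ≠ l := by
          rcases lodFirstRel_rel xs l hfr with rfl | rfl <;> tauto
        simp [lodTrail, hxl, hr]

def lodStep (s : Bool × Bool) (x : String) : Bool × Bool :=
  if x = "Like" then (!s.1, false)
  else if x = "Dislike" then (false, !s.2)
  else s

-- A's foldl state on r.reverse, characterised by the leading run of r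
lemma lodFold_spec (r : List String) :
    r.reverse.foldl lodStep (false, false) =
      match lodFirstRel r with
      | none => (false, false)
      | some l =>
        if l = "Like" then (decide (lodTrail r "Like" % 2 = 1), false)
        else (false, decide (lodTrail r "Dislike" % 2 = 1)) := by
  induction r with
  | nil => rfl
  | cons x xs ih =>
    rw [List.reverse_cons, List.foldl_append, ih]
    simp only [lodFirstRel, lodTrail, List.foldl]
    have hld : ("Like" : String) ≠ "Dislike" := by decide
    by_cases hxL : x = "Like"
    · subst hxL
      cases hfr : lodFirstRel xs with
      | none =>
        have h0 := lodTrail_of_firstRel_none xs "Like" (Or.inl rfl) hfr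
        simp [lodStep, h0]
      | some m =>
        by_cases hm : m = "Like"
        · subst hm
          simp only [lodStep]
          have h2 : lodTrail xs "Like" % 2 = 0 ∨ lodTrail xs "Like" % 2 = 1 := by omega
          rcases h2 with h2 | h2 <;> simp [h2] <;> omega
        · have hm' : m = "Dislike" := by
            rcases lodFirstRel_rel xs m hfr with h | h
            · exact absurd h hm
            · exact h
          subst hm'
          have h0 := lodTrail_of_firstRel_ne xs "Like" "Dislike" (Or.inl rfl) hfr hld.symm
          simp [lodStep, hld, h0]
    · by_cases hxD : x = "Dislike"
      · subst hxD
        cases hfr : lodFirstRel xs with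
        | none =>
          have h0 := lodTrail_of_firstRel_none xs "Dislike" (Or.inr rfl) hfr
          simp [lodStep, h0, hld.symm]
        | some m =>
          by_cases hm : m = "Dislike"
          · subst hm
            simp only [lodStep, if_neg hld.symm]
            have h2 : lodTrail xs "Dislike" % 2 = 0 ∨ lodTrail xs "Dislike" % 2 = 1 := by omega
            rcases h2 with h2 | h2 <;> simp [h2, hld.symm] <;> omega
          · have hm' : m = "Like" := by
              rcases lodFirstRel_rel xs m hfr with h | h
              · exact h
              · exact absurd h hm
            subst hm'
            have h0 := lodTrail_of_firstRel_ne xs "Dislike" "Like" (Or.inr rfl) hfr hld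
            simp [lodStep, h0, hld.symm]
      · simp [lodStep, hxL, hxD]

-- ===== VERDICT (by name: the statement is the Claim_ definition above) =====
theorem like_or_dislike_spec : Claim_equal_like_or_dislike := by
  intro bs _
  unfold Spec_like_or_dislike like_or_dislike like_or_dislike_alt
  rw [show (fun (s : Bool × Bool) _input =>
        if _input = "Like" then (!s.1, false)
        else if _input = "Dislike" then (false, !s.2)
        else s) = lodStep from rfl]
  have hfold := lodFold_spec bs.reverse
  rw [List.reverse_reverse] at hfold
  rw [lodAltLoop_none bs.reverse, hfold]
  cases hfr : lodFirstRel bs.reverse with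
  | none => simp
  | some l =>
    rcases lodFirstRel_rel _ _ hfr with rfl | rfl
    · by_cases h2 : lodTrail bs.reverse "Like" % 2 = 1 <;> simp [h2]
    · by_cases h2 : lodTrail bs.reverse "Dislike" % 2 = 1 <;> simp [h2]
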